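-- pv_equiv track=rewrite | github.com/Leonn190/Pokemon-Global-Server-Definitivo | SimuladorServerJogo/GeradorMundo.py | _escolher_spawn_chunk
-- ===== SOURCE A (Python) =====
-- from typing import Dict, List, Tuple
--
-- CHUNK_BLOCOS = 10
--
-- TILES_AGUA = {0, 1}
--
-- def _tile_em(grid: List[List[int]], x: int, y: int, fallback: int = 0) -> int:
--     if 0 <= y < len(grid) and 0 <= x < len(grid[y]):
--         return int(grid[y][x])
--     return int(fallback)
--
-- def _chunk_terra_firme(grid: List[List[int]], chunk_x: int, chunk_y: int) -> bool:
--     x0 = chunk_x * CHUNK_BLOCOS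
--     y0 = chunk_y * CHUNK_BLOCOS
--     for by in range(CHUNK_BLOCOS):
--         for bx in range(CHUNK_BLOCOS):
--             if _tile_em(grid, x0 + bx, y0 + by, fallback=0) in TILES_AGUA:
--                 return False
--     return True
--
-- def _escolher_spawn_chunk(grid: List[List[int]]) -> List[int]:
--     max_chunk_x = max(0, len(grid[0]) // CHUNK_BLOCOS - 1)
--     max_chunk_y = max(0, len(grid) // CHUNK_BLOCOS - 1)
--
--     melhor = None
--     melhor_dist2 = None
--
--     for cy in range(max_chunk_y + 1):
--         for cx in range(max_chunk_x + 1):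
--             if not _chunk_terra_firme(grid, cx, cy):
--                 continue
--             dist2 = (cx * cx) + (cy * cy)
--             if melhor is None or dist2 < melhor_dist2:
--                 melhor = [cx, cy]
--                 melhor_dist2 = dist2
--
--     return melhor if melhor is not None else [0, 0]
-- ===== SOURCE B (Python) =====
-- CHUNK_BLOCOS = 10
--
-- TILES_AGUA = {0, 1}
--
--
-- def _tile_em(grid, x, y, fallback=0):
--     if 0 <= y < len(grid) and 0 <= x < len(grid[y]):
--         return int(grid[y][x])
--     return int(fallback)
--
--
-- def _chunk_terra_firme(grid, chunk_x, chunk_y):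
--     x0 = chunk_x * CHUNK_BLOCOS
--     y0 = chunk_y * CHUNK_BLOCOS
--     for by in range(CHUNK_BLOCOS):
--         for bx in range(CHUNK_BLOCOS):
--             if _tile_em(grid, x0 + bx, y0 + by, fallback=0) in TILES_AGUA:
--                 return False
--     return True
--
--
-- def _escolher_spawn_chunk(grid):
--     max_chunk_x = max(0, len(grid[0]) // CHUNK_BLOCOS - 1)
--     max_chunk_y = max(0, len(grid) // CHUNK_BLOCOS - 1)
--     # Enumerate all chunk coordinates, order them by distance to the origin
--     # (ties by row; the column is then unique), and probe them lazily:
--     # the first land chunk in that order is the answer.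
--     coords = [(cx, cy)
--               for cy in range(max_chunk_y + 1)
--               for cx in range(max_chunk_x + 1)]
--     coords.sort(key=lambda c: (c[0] * c[0] + c[1] * c[1], c[1]))
--     for cx, cy in coords:
--         if _chunk_terra_firme(grid, cx, cy):
--             return [cx, cy]
--     return [0, 0]
-- ===== Notes on version B (the rewrite author's own statement) =====
-- stated objective: faster
-- what changed: A scans every chunk row-major running the 100-tile water test on each and keeping a running minimum; B sorts the chunk coordinates once by (squared distance, row) and probes them lazily in that order, returning at the first land chunk, so the water test usually runs on a single chunk.
import Mathlib
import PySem

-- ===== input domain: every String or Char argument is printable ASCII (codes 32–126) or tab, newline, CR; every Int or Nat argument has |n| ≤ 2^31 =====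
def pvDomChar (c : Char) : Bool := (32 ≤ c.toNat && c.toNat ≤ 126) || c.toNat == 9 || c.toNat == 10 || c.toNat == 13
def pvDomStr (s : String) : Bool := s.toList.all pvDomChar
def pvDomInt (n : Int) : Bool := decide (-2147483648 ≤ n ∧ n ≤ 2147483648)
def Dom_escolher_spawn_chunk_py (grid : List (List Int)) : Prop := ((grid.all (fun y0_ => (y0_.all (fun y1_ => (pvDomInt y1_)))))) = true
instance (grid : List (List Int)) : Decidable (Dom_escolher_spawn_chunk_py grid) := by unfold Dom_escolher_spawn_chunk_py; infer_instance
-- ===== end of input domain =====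

-- B replaces A's row-major min-tracking scan by sorting all chunk coordinates by
-- distance to the origin and probing them lazily, returning at the first land chunk.

-- ===== PORT A =====
def pvTilesAgua : PySem.Set Int := PySem.Set.ofList [0, 1]

def pvTileEm (grid : List (List Int)) (x y fallback : Int) : Int :=
  if 0 ≤ y ∧ y < (grid.length : Int) ∧ 0 ≤ x ∧ x < ((PySem.List.pyGetD grid y []).length : Int) then
    PySem.List.pyGetD (PySem.List.pyGetD grid y []) x 0
  else fallback

def pvChunkTerraFirme (grid : List (List Int)) (chunkX chunkY : Int) : Bool :=
  let x0 := chunkX * 10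
  let y0 := chunkY * 10
  (PySem.List.pyRange 0 10).all fun by_ =>
    (PySem.List.pyRange 0 10).all fun bx =>
      !(PySem.Set.contains pvTilesAgua (pvTileEm grid (x0 + bx) (y0 + by_) 0))

def escolher_spawn_chunk_py (grid : List (List Int)) : List Int :=
  let maxChunkX := max 0 (PySem.Int.floordiv ((PySem.List.pyGetD grid 0 []).length : Int) 10 - 1)
  let maxChunkY := max 0 (PySem.Int.floordiv (grid.length : Int) 10 - 1)
  let st := (PySem.List.pyRange 0 (maxChunkY + 1)).foldl (fun st cy =>
      (PySem.List.pyRange 0 (maxChunkX + 1)).foldl (fun st cx =>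
        if !pvChunkTerraFirme grid cx cy then st
        else
          let dist2 := cx * cx + cy * cy
          match st with
          | none => some ([cx, cy], dist2)
          | some (melhor, melhorDist2) =>
            if dist2 < melhorDist2 then some ([cx, cy], dist2)
            else some (melhor, melhorDist2)) st)
    (none : Option (List Int × Int))
  match st with
  | some (melhor, _) => melhor
  | none => [0, 0]

-- ===== PORT B =====
def escolher_spawn_chunk_py_alt (grid : List (List Int)) : List Int :=
  let maxChunkX := max 0 (PySem.Int.floordiv ((PySem.List.pyGetD grid 0 []).length : Int) 10 - 1)
  let maxChunkY := max 0 (PySem.Int.floordiv (grid.length : Int) 10 - 1)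
  let coords := (PySem.List.pyRange 0 (maxChunkY + 1)).flatMap fun cy =>
      (PySem.List.pyRange 0 (maxChunkX + 1)).map fun cx => (cx, cy)
  let sorted := PySem.List.sorted2 coords (fun c => c.1 * c.1 + c.2 * c.2) (fun c => c.2)
  match sorted.find? (fun c => pvChunkTerraFirme grid c.1 c.2) with
  | some c => [c.1, c.2]
  | none => [0, 0]

-- ===== PRECONDITION & SPEC =====
-- Pre_ excludes only the empty grid, on which the Python (both A and B) raises IndexError at grid[0].
def Pre_escolher_spawn_chunk_py (grid : List (List Int)) : Prop := grid ≠ []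
instance (grid : List (List Int)) : Decidable (Pre_escolher_spawn_chunk_py grid) := by unfold Pre_escolher_spawn_chunk_py; infer_instance
def pvWitness_escolher_spawn_chunk_py : List (List Int) := [[2, 3]]

def Spec_escolher_spawn_chunk_py (grid : List (List Int)) (out : List Int) : Prop := out = escolher_spawn_chunk_py_alt grid
instance (grid : List (List Int)) (out : List Int) : Decidable (Spec_escolher_spawn_chunk_py grid out) := by unfold Spec_escolher_spawn_chunk_py; infer_instance

-- ===== CLAIM (what is proved, stated in full; the proofs are below) =====
def Claim_equal_escolher_spawn_chunk_py : Prop := ∀ (grid : List (List Int)), Dom_escolher_spawn_chunk_py grid → Pre_escolher_spawn_chunk_py grid → Spec_escolher_spawn_chunk_py grid (escolher_spawn_chunk_py grid)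

-- ===== LEMMAS AND PROOFS =====

-- the lexicographic key B sorts by: (squared distance to origin, row)
def pvKeyL (c : Int × Int) : Lex (Int × Int) := toLex (c.1 * c.1 + c.2 * c.2, c.2)

-- A's traversal order: row-major
def pvRowLt (a b : Int × Int) : Prop := a.2 < b.2 ∨ (a.2 = b.2 ∧ a.1 < b.1)

-- A's loop body, on a coordinate pair
def pvStep (P : Int × Int → Bool) (st : Option (List Int × Int)) (c : Int × Int) :
    Option (List Int × Int) :=
  if !P c then st
  else
    let dist2 := c.1 * c.1 + c.2 * c.2
    match st with
    | none => some ([c.1, c.2], dist2)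
    | some (melhor, melhorDist2) =>
      if dist2 < melhorDist2 then some ([c.1, c.2], dist2) else some (melhor, melhorDist2)

-- the full candidate grid of chunk coordinates, row-major
def pvCoords (grid : List (List Int)) : List (Int × Int) :=
  (PySem.List.pyRange 0 (max 0 (PySem.Int.floordiv (grid.length : Int) 10 - 1) + 1)).flatMap fun cy =>
    (PySem.List.pyRange 0 (max 0 (PySem.Int.floordiv ((PySem.List.pyGetD grid 0 []).length : Int) 10 - 1) + 1)).map fun cx => (cx, cy)

lemma pv_key_inj {a b : Int × Int} (ha : 0 ≤ a.1) (hb : 0 ≤ b.1)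
    (h : pvKeyL a = pvKeyL b) : a = b := by
  unfold pvKeyL at h
  rw [toLex_inj, Prod.mk.injEq] at h
  obtain ⟨h1, h2⟩ := h
  rw [h2] at h1
  have h3 : a.1 = b.1 := by nlinarith
  exact Prod.ext h3 h2

lemma pv_pairwise_pyRange (b : Int) : (PySem.List.pyRange 0 b).Pairwise (· < ·) := by
  rcases le_or_gt b 0 with h | h
  · have : PySem.List.pyRange 0 b = [] := by
      simp [PySem.List.pyRange, show ¬(0:Int) < b from not_lt.mpr h]
    simp [this]
  · obtain ⟨n, rfl⟩ : ∃ n : Nat, (n : Int) = b := ⟨b.toNat, Int.toNat_of_nonneg h.le⟩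
    rw [PySem.List.pyRange_zero_natCast]
    exact List.pairwise_map.mpr (List.pairwise_lt_range.imp fun h => by exact_mod_cast h)

lemma pv_mem_pyRange_nonneg {b x : Int} (h : x ∈ PySem.List.pyRange 0 b) : 0 ≤ x :=
  (PySem.List.mem_pyRange_one.mp h).1

lemma pv_coords_pairwise (grid : List (List Int)) : (pvCoords grid).Pairwise pvRowLt := by
  unfold pvCoords
  rw [List.pairwise_flatMap]
  constructor
  · intro cy _
    rw [List.pairwise_map]
    exact (pv_pairwise_pyRange _).imp (fun h => Or.inr ⟨rfl, h⟩)
  · refine (pv_pairwise_pyRange _).imp ?_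
    intro a b hab x hx y hy
    simp only [List.mem_map] at hx hy
    obtain ⟨cx, _, rfl⟩ := hx
    obtain ⟨cx', _, rfl⟩ := hy
    exact Or.inl hab

lemma pv_coords_nonneg (grid : List (List Int)) :
    ∀ c ∈ pvCoords grid, 0 ≤ c.1 ∧ 0 ≤ c.2 := by
  intro c hc
  unfold pvCoords at hc
  simp only [List.mem_flatMap, List.mem_map] at hc
  obtain ⟨cy, hcy, cx, hcx, rfl⟩ := hc
  exact ⟨pv_mem_pyRange_nonneg hcx, pv_mem_pyRange_nonneg hcy⟩

-- the two-key insertion sort is sorting by the lexicographic key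
lemma pv_sorted2_eq (xs : List (Int × Int)) :
    PySem.List.sorted2 xs (fun c => c.1 * c.1 + c.2 * c.2) (fun c => c.2)
      = PySem.List.sorted xs pvKeyL := by
  have hb : (fun (a b : Int × Int) =>
        (decide (a.1 * a.1 + a.2 * a.2 < b.1 * b.1 + b.2 * b.2) ||
          (!decide (b.1 * b.1 + b.2 * b.2 < a.1 * a.1 + a.2 * a.2) && decide (a.2 < b.2))))
      = (fun (a b : Int × Int) => decide (pvKeyL a < pvKeyL b)) := by
    funext a b
    have hiff : (pvKeyL a < pvKeyL b) ↔ (a.1 * a.1 + a.2 * a.2 < b.1 * b.1 + b.2 * b.2 ∨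
        (a.1 * a.1 + a.2 * a.2 = b.1 * b.1 + b.2 * b.2 ∧ a.2 < b.2)) := Prod.Lex.toLex_lt_toLex
    rcases lt_trichotomy (a.1 * a.1 + a.2 * a.2) (b.1 * b.1 + b.2 * b.2) with h | h | h
    · simp [hiff, h, asymm h]
    · simp [hiff, h]
    · simp [hiff, h, asymm h]
      intro he
      exact absurd he (ne_of_gt h)
  show List.foldl (fun acc x => PySem.List.insertBy
      (fun a b => (decide (a.1 * a.1 + a.2 * a.2 < b.1 * b.1 + b.2 * b.2) ||
          (!decide (b.1 * b.1 + b.2 * b.2 < a.1 * a.1 + a.2 * a.2) && decide (a.2 < b.2)))) x acc) [] xs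
    = List.foldl (fun acc x => PySem.List.insertBy
      (fun a b => decide (pvKeyL a < pvKeyL b)) x acc) [] xs
  rw [hb]

-- what A's loop computes: nothing if no candidate qualifies, else the unique
-- pvKeyL-minimal qualifying candidate
lemma pv_foldA_char (P : Int × Int → Bool) (L : List (Int × Int))
    (hrow : L.Pairwise pvRowLt) (hnn : ∀ c ∈ L, 0 ≤ c.1 ∧ 0 ≤ c.2) :
    (L.foldl (pvStep P) none = none ∧ ∀ c ∈ L, P c = false) ∨
    (∃ m, m ∈ L ∧ P m = true ∧
      L.foldl (pvStep P) none = some ([m.1, m.2], m.1 * m.1 + m.2 * m.2) ∧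
      ∀ c ∈ L, P c = true → c ≠ m → pvKeyL m < pvKeyL c) := by
  induction L using List.reverseRecOn with
  | nil => exact Or.inl ⟨rfl, by simp⟩
  | append_singleton l c ih =>
    rw [List.pairwise_append] at hrow
    obtain ⟨hrl, -, hcross⟩ := hrow
    have hrowc : ∀ a ∈ l, pvRowLt a c := fun a ha => hcross a ha c (by simp)
    have hnnl : ∀ x ∈ l, 0 ≤ x.1 ∧ 0 ≤ x.2 := fun x hx => hnn x (List.mem_append_left _ hx)
    have hnnc := hnn c (List.mem_append_right _ (by simp))
    rw [List.foldl_append]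
    simp only [List.foldl_cons, List.foldl_nil]
    rcases ih hrl hnnl with ⟨hfold, hall⟩ | ⟨m, hm, hPm, hfold, hbest⟩
    · rw [hfold]
      by_cases hPc : P c = true
      · right
        refine ⟨c, List.mem_append_right _ (by simp), hPc, by simp [pvStep, hPc], ?_⟩
        intro x hx hPx hxc
        rcases List.mem_append.mp hx with hx | hx
        · rw [hall x hx] at hPx; cases hPx
        · rw [List.mem_singleton] at hx; exact absurd hx hxc
      · left
        refine ⟨by simp [pvStep, hPc], ?_⟩
        intro x hx
        rcases List.mem_append.mp hx with hx | hx
        · exact hall x hx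
        · rw [List.mem_singleton] at hx; subst hx; simpa using hPc
    · rw [hfold]
      by_cases hPc : P c = true
      · by_cases hlt : c.1 * c.1 + c.2 * c.2 < m.1 * m.1 + m.2 * m.2
        · right
          refine ⟨c, List.mem_append_right _ (by simp), hPc, by simp [pvStep, hPc, hlt], ?_⟩
          intro x hx hPx hxc
          rcases List.mem_append.mp hx with hx | hx
          · by_cases hxm : x = m
            · subst hxm
              unfold pvKeyL
              rw [Prod.Lex.toLex_lt_toLex]
              exact Or.inl hlt
            · have h2 := hbest x hx hPx hxm
              unfold pvKeyL at h2 ⊢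
              rw [Prod.Lex.toLex_lt_toLex] at h2 ⊢
              rcases h2 with h2 | ⟨h2, -⟩
              · exact Or.inl (hlt.trans h2)
              · exact Or.inl (h2 ▸ hlt)
          · rw [List.mem_singleton] at hx; exact absurd hx hxc
        · right
          refine ⟨m, List.mem_append_left _ hm, hPm, by simp [pvStep, hPc, hlt], ?_⟩
          intro x hx hPx hxm
          rcases List.mem_append.mp hx with hx | hx
          · exact hbest x hx hPx hxm
          · rw [List.mem_singleton] at hx; subst hx
            have hd : m.1 * m.1 + m.2 * m.2 ≤ x.1 * x.1 + x.2 * x.2 := not_lt.mp hlt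
            unfold pvKeyL
            rw [Prod.Lex.toLex_lt_toLex]
            rcases lt_or_eq_of_le hd with h | h
            · exact Or.inl h
            · refine Or.inr ⟨h, ?_⟩
              rcases hrowc m hm with h2 | ⟨h2, h3⟩
              · exact h2
              · exfalso
                have hm1 : 0 ≤ m.1 := (hnnl m hm).1
                rw [h2] at h
                nlinarith
      · right
        refine ⟨m, List.mem_append_left _ hm, hPm, by simp [pvStep, hPc], ?_⟩
        intro x hx hPx hxm
        rcases List.mem_append.mp hx with hx | hx
        · exact hbest x hx hPx hxm
        · rw [List.mem_singleton] at hx; subst hx; rw [hPx] at hPc; exact absurd rfl hPc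

-- A's loop result is B's first qualifying element of the key-sorted list
lemma pv_fold_eq_find (P : Int × Int → Bool) (L : List (Int × Int))
    (hrow : L.Pairwise pvRowLt) (hnn : ∀ c ∈ L, 0 ≤ c.1 ∧ 0 ≤ c.2) :
    L.foldl (pvStep P) none
      = ((PySem.List.sorted L pvKeyL).find? P).map (fun c => ([c.1, c.2], c.1 * c.1 + c.2 * c.2)) := by
  rcases hf : (PySem.List.sorted L pvKeyL).find? P with _ | m
  · rw [List.find?_eq_none] at hf
    rcases pv_foldA_char P L hrow hnn with ⟨h1, -⟩ | ⟨m, hm, hPm, -, -⟩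
    · simp [h1]
    · exact absurd hPm (by simpa using hf m ((PySem.List.mem_sorted L pvKeyL false m).mpr hm))
  · obtain ⟨hPm, as, bs, hS, hpre⟩ := List.find?_eq_some_iff_append.mp hf
    have hmS : m ∈ PySem.List.sorted L pvKeyL := by
      rw [hS]; exact List.mem_append_right _ (by simp)
    have hmL : m ∈ L := (PySem.List.mem_sorted L pvKeyL false m).mp hmS
    have hpw := PySem.List.sorted_pairwise L pvKeyL
    rw [hS, List.pairwise_append, List.pairwise_cons] at hpw
    obtain ⟨-, ⟨hmbs, -⟩, -⟩ := hpw
    have hbestm : ∀ x ∈ L, P x = true → x ≠ m → pvKeyL m < pvKeyL x := by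
      intro x hxL hPx hxm
      have hxS : x ∈ PySem.List.sorted L pvKeyL := (PySem.List.mem_sorted L pvKeyL false x).mpr hxL
      rw [hS] at hxS
      rcases List.mem_append.mp hxS with hx | hx
      · exact absurd hPx (by simpa using hpre x hx)
      · rcases List.mem_cons.mp hx with hx | hx
        · exact absurd hx hxm
        · refine lt_of_le_of_ne (hmbs x hx) ?_
          intro he
          exact hxm (pv_key_inj (hnn m hmL).1 (hnn x hxL).1 he).symm
    rcases pv_foldA_char P L hrow hnn with ⟨-, hall⟩ | ⟨m', hm', hPm', hfold, hbest'⟩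
    · rw [hall m hmL] at hPm; cases hPm
    · have hmm : m' = m := by
        by_cases h : m' = m
        · exact h
        · exact absurd (hbestm m' hm' hPm' h) (lt_asymm (hbest' m hmL hPm (Ne.symm h)))
      subst hmm
      rw [hfold]
      rfl

-- ===== VERDICT (by name: the statement is the Claim_ definition above) =====
theorem escolher_spawn_chunk_py_spec : Claim_equal_escolher_spawn_chunk_py := by
  intro grid _ _
  unfold Spec_escolher_spawn_chunk_py
  have hA : (PySem.List.pyRange 0 (max 0 (PySem.Int.floordiv (grid.length : Int) 10 - 1) + 1)).foldl (fun st cy =>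
      (PySem.List.pyRange 0 (max 0 (PySem.Int.floordiv ((PySem.List.pyGetD grid 0 []).length : Int) 10 - 1) + 1)).foldl (fun st cx =>
        if !pvChunkTerraFirme grid cx cy then st
        else
          let dist2 := cx * cx + cy * cy
          match st with
          | none => some ([cx, cy], dist2)
          | some (melhor, melhorDist2) =>
            if dist2 < melhorDist2 then some ([cx, cy], dist2)
            else some (melhor, melhorDist2)) st)
      (none : Option (List Int × Int))
      = (pvCoords grid).foldl (pvStep (fun c => pvChunkTerraFirme grid c.1 c.2)) none := by
    unfold pvCoords
    rw [List.foldl_flatMap]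
    simp only [List.foldl_map]
    rfl
  have hAexp : escolher_spawn_chunk_py grid
      = match (pvCoords grid).foldl (pvStep (fun c => pvChunkTerraFirme grid c.1 c.2)) none with
        | some (melhor, _) => melhor
        | none => [0, 0] := by
    rw [← hA]; rfl
  have hBexp : escolher_spawn_chunk_py_alt grid
      = match (PySem.List.sorted (pvCoords grid) pvKeyL).find? (fun c => pvChunkTerraFirme grid c.1 c.2) with
        | some c => [c.1, c.2]
        | none => [0, 0] := by
    rw [← pv_sorted2_eq]; rfl
  rw [hAexp, hBexp,
    pv_fold_eq_find (fun c => pvChunkTerraFirme grid c.1 c.2) (pvCoords grid)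
      (pv_coords_pairwise grid) (pv_coords_nonneg grid)]
  rcases hf : (PySem.List.sorted (pvCoords grid) pvKeyL).find? (fun c => pvChunkTerraFirme grid c.1 c.2) with _ | c <;>
    rw [hf] <;> rfl
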